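-- pv_equiv track=rewrite | github.com/OtabekATW/list_search | find10_min_even.py | find_min_even
-- ===== SOURCE A (Python) =====
-- def find_min_even(data):
--     """
--     Given the list of numbers, Find the minimum even number in the list
--     args:
--         data: list of numbers
--     returns: minimum even number in the list
--     """
--     i = 0
--     list1 = []
--     while i < len(data):
--
--         if data[i] % 2 == 0:
--             list1.append(data[i])
--         i += 1
--
--     k = 0
--     mn_even = list1[k]
--     while k < len(list1):
--
--         if list1[k] < mn_even:
--             mn_even = list1[k]
--
--         k += 1
--
--     return mn_even
-- ===== SOURCE B (Python) =====
-- def find_min_even(data):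
--     evens = sorted(x for x in data if x % 2 == 0)
--     return evens[0]
-- ===== Notes on version B (the rewrite author's own statement) =====
-- stated objective: simpler
-- what changed: Replaces the two explicit index-driven while loops (collect evens, then scan-and-compare for the minimum) with a one-line filter-then-sort, returning the first element of the sorted evens.
import Mathlib
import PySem

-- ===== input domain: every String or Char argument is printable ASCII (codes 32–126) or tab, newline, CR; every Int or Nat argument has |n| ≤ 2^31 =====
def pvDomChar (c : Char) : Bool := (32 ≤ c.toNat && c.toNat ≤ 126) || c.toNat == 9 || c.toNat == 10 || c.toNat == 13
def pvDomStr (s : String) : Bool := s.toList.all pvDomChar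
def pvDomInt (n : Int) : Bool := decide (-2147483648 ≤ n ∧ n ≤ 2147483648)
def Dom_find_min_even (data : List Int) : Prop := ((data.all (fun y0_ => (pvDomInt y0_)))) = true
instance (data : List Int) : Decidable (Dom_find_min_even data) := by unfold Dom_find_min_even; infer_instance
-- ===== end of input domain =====

-- ===== PORT A =====
-- B changes the algorithm: filter + sort + take first, instead of two index loops (objective: simpler).
-- literal port of A: index-driven collection of evens, then index-driven min scan starting at list1[0]
def find_min_even (data : List Int) : Int :=
  let list1 : List Int :=
    (PySem.List.pyRange 0 data.length 1).foldl
      (fun acc i =>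
        if PySem.Int.mod (PySem.List.pyGetD data i 0) 2 = 0 then
          acc ++ [PySem.List.pyGetD data i 0]
        else acc) []
  let mn0 := PySem.List.pyGetD list1 0 0
  (PySem.List.pyRange 0 list1.length 1).foldl
    (fun mn k =>
      if PySem.List.pyGetD list1 k 0 < mn then PySem.List.pyGetD list1 k 0 else mn) mn0

-- ===== PORT B =====
def find_min_even_alt (data : List Int) : Int :=
  let evens := PySem.List.sorted (data.filter (fun x => PySem.Int.mod x 2 = 0)) (fun x => x) false
  PySem.List.pyGetD evens 0 0

-- ===== PRECONDITION & SPEC =====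
-- Pre_ excludes exactly the inputs with no even element, where both Pythons raise IndexError.
def Pre_find_min_even (data : List Int) : Prop :=
  ∃ x ∈ data, PySem.Int.mod x 2 = 0
instance (data : List Int) : Decidable (Pre_find_min_even data) := by unfold Pre_find_min_even; infer_instance
def pvWitness_find_min_even : List Int := [3, 2, 4]
def Spec_find_min_even (data : List Int) (out : Int) : Prop := out = find_min_even_alt data
instance (data : List Int) (out : Int) : Decidable (Spec_find_min_even data out) := by unfold Spec_find_min_even; infer_instance

-- ===== CLAIM (what is proved, stated in full; the proofs are below) =====
def Claim_equal_find_min_even : Prop := ∀ (data : List Int), Dom_find_min_even data → Pre_find_min_even data → Spec_find_min_even data (find_min_even data)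

-- ===== LEMMAS AND PROOFS =====

-- the running-min fold returns its start or a list element, and is ≤ the start and every element
lemma foldl_min_scan (l : List Int) (a : Int) :
    (l.foldl (fun mn x => if x < mn then x else mn) a = a ∨
       l.foldl (fun mn x => if x < mn then x else mn) a ∈ l) ∧
    l.foldl (fun mn x => if x < mn then x else mn) a ≤ a ∧
    ∀ y ∈ l, l.foldl (fun mn x => if x < mn then x else mn) a ≤ y := by
  induction l generalizing a with
  | nil => simp
  | cons h t ih =>
    simp only [List.foldl_cons]
    obtain ⟨h1, h2, h3⟩ := ih (if h < a then h else a)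
    refine ⟨?_, ?_, ?_⟩
    · rcases h1 with h1 | h1
      · rw [h1]; split_ifs with hc
        · exact Or.inr List.mem_cons_self
        · exact Or.inl rfl
      · exact Or.inr (List.mem_cons_of_mem _ h1)
    · refine le_trans h2 ?_; split_ifs <;> omega
    · intro y hy
      rcases List.mem_cons.mp hy with rfl | hy
      · refine le_trans h2 ?_; split_ifs <;> omega
      · exact h3 y hy

lemma find_min_even_eq_scan (data : List Int) :
    find_min_even data =
      (data.filter (fun x => decide (PySem.Int.mod x 2 = 0))).foldl
        (fun mn x => if x < mn then x else mn)
        (PySem.List.pyGetD (data.filter (fun x => decide (PySem.Int.mod x 2 = 0))) 0 0) := by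
  simp only [find_min_even]
  rw [PySem.List.foldl_pyRange_zero_pyGetD' data 0
        (fun acc x => if PySem.Int.mod x 2 = 0 then acc ++ [x] else acc) [],
      PySem.List.foldl_append_ite_eq_filter, List.nil_append]
  set l := data.filter (fun x => decide (PySem.Int.mod x 2 = 0))
  exact PySem.List.foldl_pyRange_zero_pyGetD' l 0
    (fun mn x => if x < mn then x else mn) (PySem.List.pyGetD l 0 0)

-- ===== VERDICT (by name: the statement is the Claim_ definition above) =====
theorem find_min_even_spec : Claim_equal_find_min_even := by
  intro data _ hpre
  obtain ⟨x, hx, hx2⟩ := hpre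
  set l := data.filter (fun x => decide (PySem.Int.mod x 2 = 0)) with hl
  have hne : l ≠ [] := by
    intro h
    have hxl : x ∈ l := List.mem_filter.mpr ⟨hx, by simp [(PySem.Int.mod_eq_zero_iff_dvd x 2).mp hx2]⟩
    rw [h] at hxl; exact List.not_mem_nil hxl
  obtain ⟨h, t, hlht⟩ := List.exists_cons_of_ne_nil hne
  unfold Spec_find_min_even find_min_even_alt
  rw [find_min_even_eq_scan, ← hl, hlht]
  have hsne : PySem.List.sorted (h :: t) (fun x => x) false ≠ [] := by
    simp [PySem.List.sorted_eq_nil_iff]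
  obtain ⟨m, s, hms⟩ := List.exists_cons_of_ne_nil hsne
  rw [hms]
  have hm_mem : m ∈ (h :: t) := by
    rw [← PySem.List.mem_sorted (key := fun x => x) (rev := false), hms]
    exact List.mem_cons_self
  have hm_min : ∀ y ∈ (h :: t), m ≤ y :=
    PySem.List.key_head_sorted_le (xs := h :: t) (key := fun x => x) hms
  have hget : PySem.List.pyGetD (h :: t) 0 0 = h := by
    simp [PySem.List.pyGetD, PySem.List.pyGet?, PySem.List.pyIdx?]
  rw [hget]
  obtain ⟨h1, h2, h3⟩ := foldl_min_scan (h :: t) h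
  set r := (h :: t).foldl (fun mn x => if x < mn then x else mn) h with hr
  have hr_mem : r ∈ (h :: t) := by
    rcases h1 with h1 | h1
    · rw [h1]; exact List.mem_cons_self
    · exact h1
  have hgm : PySem.List.pyGetD (m :: s) 0 0 = m := by
    simp [PySem.List.pyGetD, PySem.List.pyGet?, PySem.List.pyIdx?]
  rw [hgm]
  exact le_antisymm (h3 m hm_mem) (hm_min r hr_mem)
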